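/- GENERATED by farm/mkstatement.py from design/units.tsv (unit `start_decoder.C9d`) and the assertions of Vorbis/Spec/StartDecoderC9.lean — do not edit.
   THE STATEMENT of the proof unit `start_decoder.C9d`: segment C9d of `start_decoder` (2 instructions; entries 0x114b91,0x114ba8;
   exits 0x113b22; ranges 0x114b91-0x114b91 + 0x114ba8-0x114ba8)
   takes each of its entry assertions to one of its exit assertions (`Vorbis.Spec.StartDecoder.SegC9d`), given the contracts of its callees.
   What the names mean: Vorbis/Spec/Basic.lean (the shared hypotheses), Vorbis/Spec/StartDecoderC9.lean (the assertions). The theorem to prove: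
   `theorem start_decoder_C9d_ok : Vorbis.Spec.start_decoder_C9d.Statement`. -/
import Vorbis.Spec.StartDecoderC9
namespace Vorbis.Spec.start_decoder_C9d
open X86 X86.User Asan

/-- The statement of unit `start_decoder.C9d`. -/
def Statement : Prop :=
  ∀ (Lay : Layout) (_hLay : Lay.hi = 0x1000000) (μ : Microarch) (_hμ : UserX.MicroOK μ) (u₀ : State)
    (_hcode : HasCodeNat Lay u₀ Vorbis.L.start_decoder.entry Vorbis.Code.code_start_decoder.nat Vorbis.L.start_decoder.size),
    Vorbis.Spec.StartDecoder.SegC9d Lay μ u₀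

end Vorbis.Spec.start_decoder_C9d
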